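-- pv_equiv track=rewrite | github.com/JD-P/RetroInstruct | AgentEditorRepairDiffs/quickstart.py | split_lines_with_custom_newlines
-- ===== SOURCE A (Python) =====
-- def split_lines_with_custom_newlines(content, newline_chars):
--     """
--     Splits the lines in a file based on a custom set of newline characters.
--
--     :param file_path: Path to the file to be read.
--     :param newline_chars: A set of characters to be considered as newlines.
--     :return: A list of lines split based on the custom newline characters.
--     """
--     lines = []
--     current_line = []
--
--     for char in content:
--         current_line.append(char)
--         if char in newline_chars:
--             lines.append(''.join(current_line))
--             current_line = []
--     # Add the last line if there is any remaining content
--     if current_line: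
--         lines.append(''.join(current_line))
--
--     return lines
-- ===== SOURCE B (Python) =====
-- def split_lines_with_custom_newlines(content, newline_chars):
--     """Index-based re-implementation: record cut positions once, then slice."""
--     terms = set(newline_chars)
--     cuts = [i + 1 for i, ch in enumerate(content) if ch in terms]
--     starts = [0] + cuts
--     ends = cuts + [len(content)]
--     return [content[s:e] for s, e in zip(starts, ends) if s < e]
-- ===== Notes on version B (the rewrite author's own statement) =====
-- stated objective: alternative
-- what changed: Replaces A's per-character accumulate-and-flush loop with an index-based pipeline: collect the cut positions once with enumerate, zip consecutive bounds, and slice the content, keeping only non-empty ranges.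
import Mathlib
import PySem

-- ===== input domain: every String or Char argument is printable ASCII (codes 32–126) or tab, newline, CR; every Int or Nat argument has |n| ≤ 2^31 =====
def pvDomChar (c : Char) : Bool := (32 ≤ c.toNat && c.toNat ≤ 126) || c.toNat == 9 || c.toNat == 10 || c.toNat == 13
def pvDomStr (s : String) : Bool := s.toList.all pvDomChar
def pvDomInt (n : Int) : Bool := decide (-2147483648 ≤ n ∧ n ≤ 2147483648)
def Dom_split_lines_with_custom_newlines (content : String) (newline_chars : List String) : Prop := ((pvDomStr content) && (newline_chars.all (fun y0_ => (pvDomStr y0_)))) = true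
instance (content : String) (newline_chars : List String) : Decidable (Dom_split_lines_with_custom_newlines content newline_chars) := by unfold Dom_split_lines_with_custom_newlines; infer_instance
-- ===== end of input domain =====

-- B replaces A's per-char accumulate-and-flush loop by three comprehensions: record the
-- cut positions once, pair up consecutive bounds, and slice (objective: alternative).

-- ===== PORT A =====
-- A: one pass, appending each char to current_line, flushing at terminators.
def split_lines_with_custom_newlines (content : String) (newline_chars : List String) : List String :=
  let r := content.toList.foldl
    (fun (st : List String × List Char) (c : Char) =>
      let cur := st.2 ++ [c]
      if String.ofList [c] ∈ newline_chars then (st.1 ++ [String.ofList cur], []) else (st.1, cur))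
    ([], [])
  if r.2.isEmpty then r.1 else r.1 ++ [String.ofList r.2]

-- ===== PORT B =====
-- B: cut positions via enumerate, then zip consecutive bounds and slice.
def split_lines_with_custom_newlines_alt (content : String) (newline_chars : List String) : List String :=
  let terms : PySem.Set String := PySem.Set.ofList newline_chars
  let cs := content.toList
  let cuts : List Int := (PySem.List.enumerate cs 0).filterMap
    (fun p => if String.ofList [p.2] ∈ terms then some (p.1 + 1) else none)
  let starts : List Int := 0 :: cuts
  let ends : List Int := cuts ++ [(cs.length : Int)]
  ((starts.zip ends).filter (fun p => decide (p.1 < p.2))).map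
    (fun p => String.ofList (PySem.List.slice cs (some p.1) (some p.2)))

-- ===== PRECONDITION & SPEC =====
def Spec_split_lines_with_custom_newlines (content : String) (newline_chars : List String) (out : List String) : Prop := out = split_lines_with_custom_newlines_alt content newline_chars
instance (content : String) (newline_chars : List String) (out : List String) : Decidable (Spec_split_lines_with_custom_newlines content newline_chars out) := by unfold Spec_split_lines_with_custom_newlines; infer_instance

-- ===== CLAIM (what is proved, stated in full; the proofs are below) =====
def Claim_equal_split_lines_with_custom_newlines : Prop := ∀ (content : String) (newline_chars : List String), Dom_split_lines_with_custom_newlines content newline_chars → Spec_split_lines_with_custom_newlines content newline_chars (split_lines_with_custom_newlines content newline_chars)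

-- ===== LEMMAS AND PROOFS =====

/-- Is `c` (as a 1-char string) one of the newline strings? -/
def pvTerm (nl : List String) (c : Char) : Bool := decide (String.ofList [c] ∈ nl)

/-- A's loop, reformulated structurally: current line as explicit accumulator. -/
def pvAaux (nl : List String) : List Char → List Char → List (List Char)
  | [], cur => if cur = [] then [] else [cur]
  | c :: cs, cur => if pvTerm nl c then (cur ++ [c]) :: pvAaux nl cs [] else pvAaux nl cs (cur ++ [c])

/-- Prepend a char onto the first segment (creating one if none). -/
def pvConsFirst (c : Char) : List (List Char) → List (List Char)
  | [] => [[c]]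
  | l :: ls => (c :: l) :: ls

/-- The intended segment list, defined structurally from the front. -/
def pvBsegs (nl : List String) : List Char → List (List Char)
  | [] => []
  | c :: cs => if pvTerm nl c then [c] :: pvBsegs nl cs else pvConsFirst c (pvBsegs nl cs)

def pvPrependAll (cur : List Char) : List (List Char) → List (List Char)
  | [] => if cur = [] then [] else [cur]
  | l :: ls => (cur ++ l) :: ls

/-- Nat-valued cut positions with running offset. -/
def pvCutsN (nl : List String) : List Char → Nat → List Nat
  | [], _ => []
  | c :: cs, i => if pvTerm nl c then (i + 1) :: pvCutsN nl cs (i + 1) else pvCutsN nl cs (i + 1)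

/-- B's zip/filter/slice pipeline over Nat bounds. -/
def pvCoreP (cs : List Char) (L1 L2 : List Nat) : List (List Char) :=
  ((L1.zip L2).filter (fun p => decide (p.1 < p.2))).map (fun p => (cs.drop p.1).take (p.2 - p.1))

theorem pvAaux_eq_prependAll (nl : List String) (cs : List Char) :
    ∀ cur, pvAaux nl cs cur = pvPrependAll cur (pvBsegs nl cs) := by
  induction cs with
  | nil => intro cur; rfl
  | cons c cs ih =>
    intro cur
    by_cases h : pvTerm nl c = true
    · simp [pvAaux, pvBsegs, h, ih]
      cases hB : pvBsegs nl cs <;> simp [pvPrependAll]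
    · simp [pvAaux, pvBsegs, h, ih]
      cases hB : pvBsegs nl cs with
      | nil => simp [pvPrependAll, pvConsFirst]
      | cons l ls => simp [pvPrependAll, pvConsFirst]

theorem pvA_foldl (nl : List String) (cs : List Char) :
    ∀ lines cur,
      (let r := cs.foldl
        (fun (st : List String × List Char) (c : Char) =>
          let cur := st.2 ++ [c]
          if String.ofList [c] ∈ nl then (st.1 ++ [String.ofList cur], []) else (st.1, cur))
        (lines, cur)
       if r.2.isEmpty then r.1 else r.1 ++ [String.ofList r.2])
      = lines ++ (pvAaux nl cs cur).map String.ofList := by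
  induction cs with
  | nil =>
    intro lines cur
    cases cur <;> simp [pvAaux]
  | cons c cs ih =>
    intro lines cur
    by_cases h : String.ofList [c] ∈ nl
    · simpa [pvAaux, pvTerm, h, ih] using ih (lines ++ [String.ofList (cur ++ [c])]) []
    · simpa [pvAaux, pvTerm, h] using ih lines (cur ++ [c])

theorem pvCutsN_succ (nl : List String) (cs : List Char) :
    ∀ i, pvCutsN nl cs (i + 1) = (pvCutsN nl cs i).map (· + 1) := by
  induction cs with
  | nil => intro i; rfl
  | cons c cs ih =>
    intro i
    by_cases h : pvTerm nl c = true <;> simp [pvCutsN, h, ih]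

theorem pvCutsN_pos (nl : List String) (cs : List Char) :
    ∀ i x, x ∈ pvCutsN nl cs i → i + 1 ≤ x := by
  induction cs with
  | nil => intro i x hx; simp [pvCutsN] at hx
  | cons c cs ih =>
    intro i x hx
    by_cases h : pvTerm nl c = true <;> simp [pvCutsN, h] at hx
    · rcases hx with rfl | hx
      · omega
      · have := ih (i + 1) x hx; omega
    · have := ih (i + 1) x hx; omega

theorem pvCoreP_shift (c : Char) (cs : List Char) (L1 : List Nat) :
    ∀ L2, pvCoreP (c :: cs) (L1.map (· + 1)) (L2.map (· + 1)) = pvCoreP cs L1 L2 := by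
  induction L1 with
  | nil => intro L2; rfl
  | cons a L1 ih =>
    intro L2
    cases L2 with
    | nil => rfl
    | cons b L2 =>
      by_cases h : a < b
      · simp [pvCoreP, h] at ih ⊢
        exact ih L2
      · simp [pvCoreP, h] at ih ⊢
        exact ih L2

theorem pvBsegs_of_no_cuts (nl : List String) (cs : List Char) :
    ∀ i, pvCutsN nl cs i = [] → pvBsegs nl cs = if cs = [] then [] else [cs] := by
  induction cs with
  | nil => intro i _; rfl
  | cons c cs ih =>
    intro i h
    by_cases ht : pvTerm nl c = true
    · simp [pvCutsN, ht] at h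
    · simp [pvCutsN, ht] at h
      simp [pvBsegs, ht, ih (i + 1) h]
      cases hcs : cs <;> simp [pvConsFirst]

theorem pvCoreP_cons_lt (cs : List Char) (a b : Nat) (L1 L2 : List Nat) (hab : a < b) :
    pvCoreP cs (a :: L1) (b :: L2) = ((cs.drop a).take (b - a)) :: pvCoreP cs L1 L2 := by
  simp [pvCoreP, hab]

theorem pvCutsN_cons_zero (nl : List String) (cs : List Char) :
    pvCutsN nl cs 1 = (pvCutsN nl cs 0).map (· + 1) := pvCutsN_succ nl cs 0

theorem pvBsegs_cons (nl : List String) (c : Char) (cs : List Char) :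
    pvBsegs nl (c :: cs) = if pvTerm nl c then [c] :: pvBsegs nl cs else pvConsFirst c (pvBsegs nl cs) := rfl

theorem pvCoreP_main (nl : List String) (cs : List Char) :
    pvCoreP cs (0 :: pvCutsN nl cs 0) (pvCutsN nl cs 0 ++ [cs.length]) = pvBsegs nl cs := by
  induction cs with
  | nil => rfl
  | cons c cs ih =>
    have hcuts : pvCutsN nl (c :: cs) 0
        = (if pvTerm nl c then [1] else []) ++ (pvCutsN nl cs 0).map (· + 1) := by
      by_cases h : pvTerm nl c = true <;>
        simp [pvCutsN, h, pvCutsN_cons_zero nl cs]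
    have hlen : (c :: cs).length = cs.length + 1 := rfl
    by_cases h : pvTerm nl c = true
    · rw [hcuts, if_pos h, hlen]
      have hsh := pvCoreP_shift c cs (0 :: pvCutsN nl cs 0) (pvCutsN nl cs 0 ++ [cs.length])
      simp only [List.map_cons, List.map_append, List.map_nil] at hsh
      rw [List.singleton_append, List.cons_append, pvCoreP_cons_lt _ 0 1 _ _ (by omega)]
      simp only [List.drop_zero, Nat.sub_zero, List.take_succ_cons, List.take_zero]
      rw [show (0 : Nat) + 1 = 1 from rfl] at hsh
      rw [hsh, ih]
      simp [pvBsegs, h]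
    · rw [hcuts, if_neg (by simp [h]), hlen, List.nil_append]
      cases hK : pvCutsN nl cs 0 with
      | nil =>
        have hB := pvBsegs_of_no_cuts nl cs 0 hK
        simp only [List.map_nil, List.nil_append]
        rw [pvCoreP_cons_lt _ 0 (cs.length + 1) [] [] (by omega)]
        simp only [List.drop_zero, Nat.sub_zero, pvCoreP, List.zip_nil_left,
          List.filter_nil, List.map_nil]
        rw [List.take_of_length_le (by simp)]
        cases hcs : cs with
        | nil => subst hcs; simp [pvBsegs, h, pvConsFirst]
        | cons d ds =>
          subst hcs
          rw [if_neg (by simp)] at hB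
          rw [pvBsegs_cons, if_neg (by simp [h]), hB]
          rfl
      | cons k K =>
        have hk1 : 1 ≤ k := pvCutsN_pos nl cs 0 k (by simp [hK])
        have hsh := pvCoreP_shift c cs (k :: K) (K ++ [cs.length])
        simp only [List.map_cons, List.map_append, List.map_nil] at hsh
        rw [hK] at ih
        simp only [List.cons_append] at ih
        rw [pvCoreP_cons_lt cs 0 k (k :: K) (K ++ [cs.length]) (by omega)] at ih
        simp only [List.map_cons, List.cons_append]
        rw [pvCoreP_cons_lt _ 0 (k + 1) _ _ (by omega)]
        simp only [List.drop_zero, Nat.sub_zero, List.take_succ_cons]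
        rw [hsh]
        simp only [Nat.sub_zero, List.drop_zero] at ih
        rw [pvBsegs_cons, if_neg (by simp [h]), ← ih, pvConsFirst]

theorem pvCuts_cast (nl : List String) (cs : List Char) :
    ∀ (m : Nat), (PySem.List.enumerate cs (m : Int)).filterMap
      (fun p => if String.ofList [p.2] ∈ PySem.Set.ofList nl then some (p.1 + 1) else none)
      = (pvCutsN nl cs m).map (fun (n : Nat) => (n : Int)) := by
  induction cs with
  | nil => intro m; simp [PySem.List.enumerate_nil, pvCutsN]
  | cons c cs ih =>
    intro m
    rw [PySem.List.enumerate_cons]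
    have hmem : (String.ofList [c] ∈ PySem.Set.ofList nl) ↔ String.ofList [c] ∈ nl :=
      PySem.Set.mem_ofList _ _
    have hcast : ((m : Int) + 1) = (((m + 1 : Nat)) : Int) := by push_cast; ring
    rw [hcast]
    by_cases h : String.ofList [c] ∈ nl
    · have ht : pvTerm nl c = true := by simp [pvTerm, h]
      simp only [List.filterMap_cons]
      rw [if_pos (hmem.mpr h), ih (m + 1)]
      simp [pvCutsN, ht, ← hcast]
    · have ht : pvTerm nl c = false := by simp [pvTerm, h]
      simp only [List.filterMap_cons]
      rw [if_neg (fun hc => h (hmem.mp hc)), ih (m + 1)]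
      simp [pvCutsN, ht]

theorem pvIntSide (cs : List Char) (L1 : List Nat) :
    ∀ L2 : List Nat,
      (((L1.map (fun (n : Nat) => (n : Int))).zip (L2.map (fun (n : Nat) => (n : Int)))).filter
          (fun p => decide (p.1 < p.2))).map
        (fun p => String.ofList (PySem.List.slice cs (some p.1) (some p.2)))
      = (pvCoreP cs L1 L2).map String.ofList := by
  induction L1 with
  | nil => intro L2; simp [pvCoreP]
  | cons a L1 ih =>
    intro L2
    cases L2 with
    | nil => simp [pvCoreP]
    | cons b L2 =>
      by_cases h : a < b
      · simp only [List.map_cons, List.zip_cons_cons, List.filter_cons,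
          decide_eq_true_eq, Nat.cast_lt, h, if_pos, List.map_cons,
          PySem.List.slice_natCast, ih L2, pvCoreP_cons_lt cs a b L1 L2 h]
      · have hI : ¬ ((a : Int) < (b : Int)) := by exact_mod_cast h
        simp only [List.map_cons, List.zip_cons_cons, List.filter_cons,
          decide_eq_true_eq, hI, if_false, ih L2]
        simp [pvCoreP, h]

theorem pvB_eq_segs (nl : List String) (s : String) :
    split_lines_with_custom_newlines_alt s nl = (pvBsegs nl s.toList).map String.ofList := by
  unfold split_lines_with_custom_newlines_alt
  simp only []
  set cs := s.toList with hcs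
  rw [show ((0 : Int)) = ((0 : Nat) : Int) from rfl, pvCuts_cast nl cs 0]
  have h1 : ((0 : Nat) : Int) :: (pvCutsN nl cs 0).map (fun (n : Nat) => (n : Int))
      = ((0 : Nat) :: pvCutsN nl cs 0).map (fun (n : Nat) => (n : Int)) := by rw [List.map_cons]
  have h2 : (pvCutsN nl cs 0).map (fun (n : Nat) => (n : Int)) ++ [(cs.length : Int)]
      = (pvCutsN nl cs 0 ++ [cs.length]).map (fun (n : Nat) => (n : Int)) := by simp
  rw [h1, h2, pvIntSide cs (0 :: pvCutsN nl cs 0) (pvCutsN nl cs 0 ++ [cs.length]),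
    pvCoreP_main nl cs]

-- ===== VERDICT (by name: the statement is the Claim_ definition above) =====
theorem split_lines_with_custom_newlines_spec : Claim_equal_split_lines_with_custom_newlines := by
  intro content nl _
  unfold Spec_split_lines_with_custom_newlines split_lines_with_custom_newlines
  have hA := pvA_foldl nl content.toList [] []
  simp only [List.nil_append] at hA
  rw [hA, pvAaux_eq_prependAll, pvB_eq_segs nl content]
  cases hB : pvBsegs nl content.toList <;> simp [pvPrependAll]
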